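-- pv_equiv track=rewrite | github.com/hawaiianpizz4/proyectoml | funciones.py | numeroTokensDoc
-- ===== SOURCE A (Python) =====
-- def numeroTokensDoc(diccionario,documento):
--   #lista de numero de tokens que hay en el documento
--   lista = []
--   for tokenDic in diccionario:
--     #numero de tokens que hay en el documento con el token del diccionario
--     n = 0
--     for tokenDoc in documento:
--       #si son iguales se suma n
--       if(tokenDic == tokenDoc):
--         n+=1
--     lista.append(n)
--   return lista
-- ===== SOURCE B (Python) =====
-- def numeroTokensDoc(diccionario, documento):
--     # Inverted index: each dictionary token -> list of its positions in diccionario.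
--     index = {}
--     for i, tokenDic in enumerate(diccionario):
--         index.setdefault(tokenDic, []).append(i)
--     result = [0] * len(diccionario)
--     # Single pass over the document, scattering counts into the result array.
--     for tokenDoc in documento:
--         for i in index.get(tokenDoc, []):
--             result[i] += 1
--     return result
-- ===== Notes on version B (the rewrite author's own statement) =====
-- stated objective: alternative
-- what changed: Instead of rescanning the document once per dictionary token, B builds an inverted index from token to its positions in the dictionary, starts from a zero array, and makes one pass over the document scattering increments into every position of the matching token; on duplicate-heavy dictionaries the scatter work matches A's cost, so no speed is claimed.
import Mathlib
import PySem

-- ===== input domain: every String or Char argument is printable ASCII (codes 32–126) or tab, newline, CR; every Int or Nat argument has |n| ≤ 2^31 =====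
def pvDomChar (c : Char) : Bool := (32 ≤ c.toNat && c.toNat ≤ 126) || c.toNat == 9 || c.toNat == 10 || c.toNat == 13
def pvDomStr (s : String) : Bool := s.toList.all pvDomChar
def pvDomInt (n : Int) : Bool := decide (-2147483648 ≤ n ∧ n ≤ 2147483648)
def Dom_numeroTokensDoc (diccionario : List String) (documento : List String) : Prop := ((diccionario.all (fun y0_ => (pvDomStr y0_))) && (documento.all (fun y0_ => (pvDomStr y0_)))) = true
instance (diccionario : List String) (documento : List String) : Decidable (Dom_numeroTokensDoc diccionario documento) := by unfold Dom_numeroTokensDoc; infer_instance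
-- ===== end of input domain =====

-- B replaces A's per-token rescans of the document with an inverted index (token -> positions
-- in the dictionary) and one scatter pass over the document; equal return value proved below.

-- ===== PORT A =====
-- Port of A: for each dictionary token, scan the whole document counting equal tokens.
def numeroTokensDoc (diccionario : List String) (documento : List String) : List Int :=
  diccionario.foldl (fun lista tokenDic =>
    lista ++ [documento.foldl (fun n tokenDoc => if tokenDic == tokenDoc then n + 1 else n) (0 : Int)]) []

-- ===== PORT B =====
-- B helper: index = {}; for i, tokenDic in enumerate(diccionario): index.setdefault(tokenDic, []).append(i)
def pvBuildIndex (diccionario : List String) : PySem.Dict String (List Int) :=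
  (PySem.List.enumerate diccionario).foldl
    (fun index p => index.insert p.2 (index.getD p.2 [] ++ [p.1])) PySem.Dict.empty

-- Port of B: result = [0]*len(diccionario); one pass over documento scattering increments
-- into every dictionary position of the current token.
def numeroTokensDoc_alt (diccionario : List String) (documento : List String) : List Int :=
  documento.foldl (fun result tokenDoc =>
    ((pvBuildIndex diccionario).getD tokenDoc []).foldl
      (fun result i => PySem.List.pySetD result i (PySem.List.pyGetD result i 0 + 1)) result)
    (List.replicate diccionario.length (0 : Int))

-- ===== PRECONDITION & SPEC =====
def Spec_numeroTokensDoc (diccionario : List String) (documento : List String) (out : List Int) : Prop := out = numeroTokensDoc_alt diccionario documento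
instance (diccionario : List String) (documento : List String) (out : List Int) : Decidable (Spec_numeroTokensDoc diccionario documento out) := by unfold Spec_numeroTokensDoc; infer_instance

-- ===== CLAIM (what is proved, stated in full; the proofs are below) =====
def Claim_equal_numeroTokensDoc : Prop := ∀ (diccionario : List String) (documento : List String), Dom_numeroTokensDoc diccionario documento → Spec_numeroTokensDoc diccionario documento (numeroTokensDoc diccionario documento)

-- ===== LEMMAS AND PROOFS =====

-- A's inner loop counts occurrences.
lemma inner_count (t : String) (doc : List String) (n : Int) :
    doc.foldl (fun n d => if t == d then n + 1 else n) n = n + doc.count t := by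
  induction doc generalizing n with
  | nil => simp
  | cons h tl ih =>
    simp only [List.foldl, List.count_cons, ih]
    by_cases ht : t = h
    · simp [ht]; ring
    · simp [ht, Ne.symm ht]

-- A's outer loop is a map of counts.
lemma portA_eq (dic doc : List String) (acc : List Int) :
    dic.foldl (fun lista tokenDic =>
      lista ++ [doc.foldl (fun n d => if tokenDic == d then n + 1 else n) (0 : Int)]) acc
    = acc ++ dic.map (fun t => (doc.count t : Int)) := by
  induction dic generalizing acc with
  | nil => simp
  | cons h tl ih => rw [List.foldl_cons, ih, inner_count]; simp

-- The positions list the index stores for token t.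
def posOf (dic : List String) (t : String) : List Int :=
  (((PySem.List.enumerate dic).filter (fun p => p.2 == t)).map (·.1))

lemma buildIndex_getD (dic : List String) (t : String) :
    (pvBuildIndex dic).getD t [] = posOf dic t := by
  induction dic using List.reverseRecOn with
  | nil => simp [pvBuildIndex, posOf]
  | append_singleton xs x ih =>
    unfold pvBuildIndex posOf at *
    rw [PySem.List.enumerate_append, List.foldl_append]
    simp only [PySem.List.enumerate_cons, PySem.List.enumerate_nil, List.foldl_cons, List.foldl_nil,
      List.filter_append]
    rw [PySem.Dict.getD_insert]
    by_cases h : t = x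
    · subst h; simp [ih]
    · simp [h, Ne.symm h, ih]

lemma posOf_nonneg (dic : List String) (t : String) : ∀ j ∈ posOf dic t, 0 ≤ j := by
  intro j hj
  simp only [posOf, List.mem_map, List.mem_filter] at hj
  obtain ⟨p, ⟨hp, _⟩, rfl⟩ := hj
  rw [PySem.List.mem_enumerate_iff] at hp
  obtain ⟨k, hk, rfl⟩ := hp
  simp

lemma posOf_nodup (dic : List String) (t : String) : (posOf dic t).Nodup := by
  have h := PySem.List.pairwise_lt_enumerate (xs := dic) (s := 0)
  have h2 : ((PySem.List.enumerate dic).filter (fun p => p.2 == t)).Pairwise (fun p q => p.1 < q.1) :=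
    h.filter _
  have h3 := List.Pairwise.map (S := fun a b : Int => a < b) (f := fun p : Int × String => p.1)
    (fun a b hab => hab) h2
  exact h3.imp (fun hab => ne_of_lt hab)

lemma mem_posOf (dic : List String) (t : String) (i : Nat) (hi : i < dic.length) :
    ((i : Int) ∈ posOf dic t) ↔ dic[i] = t := by
  simp only [posOf, List.mem_map, List.mem_filter]
  constructor
  · rintro ⟨p, ⟨hp, ht⟩, hfst⟩
    rw [PySem.List.mem_enumerate_iff] at hp
    obtain ⟨k, hk, rfl⟩ := hp
    simp at ht hfst ⊢
    have : k = i := by omega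
    subst this; exact ht
  · intro h
    refine ⟨((i : Int), dic[i]), ⟨?_, by simp [h]⟩, rfl⟩
    rw [PySem.List.mem_enumerate_iff]
    exact ⟨i, hi, by simp⟩

lemma count_posOf (dic : List String) (t : String) (i : Nat) (hi : i < dic.length) :
    (posOf dic t).count (i : Int) = if dic[i] = t then 1 else 0 := by
  by_cases h : dic[i] = t
  · rw [if_pos h]
    exact List.count_eq_one_of_mem (posOf_nodup dic t) ((mem_posOf dic t i hi).2 h)
  · rw [if_neg h]
    exact List.count_eq_zero_of_not_mem (fun hm => h ((mem_posOf dic t i hi).1 hm))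

-- The inner scatter loop: length preserved, entry i gains the count of i in the position list.
lemma incAll_length (ps : List Int) (r : List Int) :
    (ps.foldl (fun r i => PySem.List.pySetD r i (PySem.List.pyGetD r i 0 + 1)) r).length
      = r.length := by
  induction ps generalizing r with
  | nil => rfl
  | cons j tl ih => rw [List.foldl_cons, ih, PySem.List.length_pySetD]

lemma incAll_getElem? (ps : List Int) (hps : ∀ j ∈ ps, 0 ≤ j) (r : List Int) (i : Nat) :
    (ps.foldl (fun r i => PySem.List.pySetD r i (PySem.List.pyGetD r i 0 + 1)) r)[i]?
      = r[i]?.map (· + (ps.count (i : Int) : Int)) := by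
  induction ps generalizing r with
  | nil => simp
  | cons j tl ih =>
    have hj : 0 ≤ j := hps j (by simp)
    have htl : ∀ x ∈ tl, 0 ≤ x := fun x hx => hps x (by simp [hx])
    rw [List.foldl_cons, ih htl, PySem.List.pySetD_of_nonneg r _ hj]
    by_cases hji : j = (i : Int)
    · subst hji
      by_cases hilen : i < r.length
      · rw [List.count_cons_self, Int.toNat_natCast, List.getElem?_set_self',
          PySem.List.pyGetD_eq_getElem r 0 (by omega) (by omega)]
        simp [List.getElem?_eq_getElem hilen]
        ring
      · rw [List.set_eq_of_length_le (by omega)]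
        simp [List.getElem?_eq_none (by omega : r.length ≤ i)]
    · have hne : j.toNat ≠ i := by omega
      rw [List.getElem?_set_ne hne, List.count_cons]
      simp [hji]

lemma scatter_length (dic doc : List String) (r : List Int) :
    (doc.foldl (fun r tok => ((pvBuildIndex dic).getD tok []).foldl
        (fun r j => PySem.List.pySetD r j (PySem.List.pyGetD r j 0 + 1)) r) r).length
      = r.length := by
  induction doc generalizing r with
  | nil => rfl
  | cons tok tl ih => rw [List.foldl_cons, ih, incAll_length]

-- The whole scatter pass adds, at each position i, the number of document tokens equal to dic[i].
lemma scatter_getElem? (dic doc : List String) (r : List Int) (i : Nat) (hi : i < dic.length) :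
    (doc.foldl (fun r tok => ((pvBuildIndex dic).getD tok []).foldl
        (fun r j => PySem.List.pySetD r j (PySem.List.pyGetD r j 0 + 1)) r) r)[i]?
      = r[i]?.map (· + (doc.count (dic[i]) : Int)) := by
  induction doc generalizing r with
  | nil => simp
  | cons tok tl ih =>
    rw [List.foldl_cons, ih, incAll_getElem? _ (by rw [buildIndex_getD]; exact posOf_nonneg dic tok)]
    rw [Option.map_map, buildIndex_getD, count_posOf dic tok i hi, List.count_cons]
    cases r[i]? with
    | none => simp
    | some v =>
      simp only [Option.map_some, Function.comp]
      congr 1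
      by_cases h : dic[i] = tok
      · simp [h]; ring
      · simp [h]
        exact fun hh => h hh.symm

-- ===== VERDICT (by name: the statement is the Claim_ definition above) =====
theorem numeroTokensDoc_spec : Claim_equal_numeroTokensDoc := by
  intro dic doc _
  unfold Spec_numeroTokensDoc numeroTokensDoc numeroTokensDoc_alt
  rw [portA_eq]
  apply List.ext_getElem?
  intro i
  by_cases hi : i < dic.length
  · rw [scatter_getElem? dic doc _ i hi]
    simp [List.getElem?_eq_getElem (by simpa using hi),
      List.getElem?_eq_getElem (by simpa using hi : i < (List.replicate dic.length (0:Int)).length)]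
  · have h1 : ([] ++ dic.map (fun t => (doc.count t : Int))).length ≤ i := by simp; omega
    rw [List.getElem?_eq_none h1, List.getElem?_eq_none (by rw [scatter_length]; simp; omega)]
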